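-- pv_equiv track=rewrite | github.com/TheTrueProblematic/EndlessProjects | PythagoreanTripletGenerator/PythagoreanTripletGenerator.py | generate_pythagorean_triplets
-- ===== SOURCE A (Python) =====
-- def generate_pythagorean_triplets(limit):
--     """A function to generate Pythagorean triplets"""
--     # This list will hold our discovered triplets.
--     triplets = []
--
--     # Triple for loop, sounds fun right? This will guarantee we check every possible triplet combination.
--     for a in range(1, limit):
--         for b in range(a, limit):
--             for c in range(b, limit):
--                 # If the triplet is a Pythagorean triplet (a^2 + b^2 = c^2), add it to the list of triplets!
--                 if a*a + b*b == c*c: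
--                     triplets.append((a, b, c))
--
--     # Return the list of triplets we discovered.
--     return triplets
-- ===== SOURCE B (Python) =====
-- def generate_pythagorean_triplets(limit):
--     """A function to generate Pythagorean triplets"""
--     triplets = []
--     for a in range(1, limit):
--         c = a
--         for b in range(a, limit):
--             s = a * a + b * b
--             while c * c < s:
--                 c += 1
--             if c * c == s and c < limit:
--                 triplets.append((a, b, c))
--     return triplets
-- ===== Notes on version B (the rewrite author's own statement) =====
-- stated objective: faster
-- what changed: Replaces the cubic triple loop with a two-pointer scan: for each a, a single candidate c advances monotonically as b grows, so the inner c-loop over the whole range disappears.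
import Mathlib
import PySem

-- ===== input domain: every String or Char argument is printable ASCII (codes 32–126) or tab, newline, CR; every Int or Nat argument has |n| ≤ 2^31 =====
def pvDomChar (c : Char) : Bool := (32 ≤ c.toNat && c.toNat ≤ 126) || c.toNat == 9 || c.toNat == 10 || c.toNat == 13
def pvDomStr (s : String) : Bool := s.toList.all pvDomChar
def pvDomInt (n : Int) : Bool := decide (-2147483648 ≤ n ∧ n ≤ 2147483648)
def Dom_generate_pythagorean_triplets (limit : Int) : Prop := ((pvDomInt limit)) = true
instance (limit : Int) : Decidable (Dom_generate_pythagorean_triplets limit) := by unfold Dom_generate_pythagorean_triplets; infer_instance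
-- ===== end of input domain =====

-- B replaces A's cubic triple loop by a two-pointer scan (per a, one candidate c advances
-- monotonically as b grows) — an asymptotically faster exact re-implementation.


-- ===== PORT A =====
def generate_pythagorean_triplets (limit : Int) : List (List Int) :=
  (PySem.List.pyRange 1 limit 1).foldl (fun acc a =>
    (PySem.List.pyRange a limit 1).foldl (fun acc b =>
      (PySem.List.pyRange b limit 1).foldl (fun acc c =>
        if a * a + b * b = c * c then acc ++ [[a, b, c]] else acc) acc) acc) []

-- ===== PORT B =====
-- the 'while c*c < s: c += 1' loop of Source B
def pvBump (s c : Int) : Int :=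
  if c * c < s then pvBump s (c + 1) else c
termination_by (s - c).toNat
decreasing_by
  have h1 : c < s := by nlinarith [mul_self_nonneg c, mul_self_nonneg (c - 1)]
  omega

def generate_pythagorean_triplets_alt (limit : Int) : List (List Int) :=
  (PySem.List.pyRange 1 limit 1).foldl (fun acc a =>
    ((PySem.List.pyRange a limit 1).foldl (fun st b =>
        let s := a * a + b * b
        let c := pvBump s st.1
        (c, if c * c = s ∧ c < limit then st.2 ++ [[a, b, c]] else st.2))
      (a, acc)).2) []

-- ===== PRECONDITION & SPEC =====
def Spec_generate_pythagorean_triplets (limit : Int) (out : List (List Int)) : Prop := out = generate_pythagorean_triplets_alt limit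
instance (limit : Int) (out : List (List Int)) : Decidable (Spec_generate_pythagorean_triplets limit out) := by unfold Spec_generate_pythagorean_triplets; infer_instance

-- ===== CLAIM (what is proved, stated in full; the proofs are below) =====
def Claim_equal_generate_pythagorean_triplets : Prop := ∀ (limit : Int), Dom_generate_pythagorean_triplets limit → Spec_generate_pythagorean_triplets limit (generate_pythagorean_triplets limit)

-- ===== LEMMAS AND PROOFS =====

-- pvBump s c is the least c' ≥ c with s ≤ c'², provided (c-1)² < s on entry.
theorem pvBump_spec_aux (s : Int) : ∀ (n : Nat) (c : Int), (s - c).toNat ≤ n →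
    (c - 1) * (c - 1) < s →
    c ≤ pvBump s c ∧ s ≤ pvBump s c * pvBump s c ∧
      (pvBump s c - 1) * (pvBump s c - 1) < s := by
  intro n
  induction n with
  | zero =>
      intro c hn h
      have hlt : ¬ c * c < s := by
        intro hlt
        have h1 : c < s := by nlinarith [mul_self_nonneg c, mul_self_nonneg (c - 1)]
        omega
      rw [pvBump, if_neg hlt]
      exact ⟨le_refl c, by omega, h⟩
  | succ n ih =>
      intro c hn h
      by_cases hlt : c * c < s
      · have h1 : c < s := by nlinarith [mul_self_nonneg c, mul_self_nonneg (c - 1)]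
        have ih' := ih (c + 1) (by omega)
          (by have : (c + 1 - 1) * (c + 1 - 1) = c * c := by ring
              omega)
        rw [pvBump, if_pos hlt]
        exact ⟨by omega, ih'.2.1, ih'.2.2⟩
      · rw [pvBump, if_neg hlt]
        exact ⟨le_refl c, by omega, h⟩

theorem pvBump_spec (s c : Int) (h : (c - 1) * (c - 1) < s) :
    c ≤ pvBump s c ∧ s ≤ pvBump s c * pvBump s c ∧
      (pvBump s c - 1) * (pvBump s c - 1) < s :=
  pvBump_spec_aux s (s - c).toNat c le_rfl h

-- A's innermost c-loop, started at any lo ≥ 1, appends [a,b,r] exactly when the unique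
-- candidate root r (characterised by s ≤ r² and (r-1)² < s) lies in [lo, limit) with r² = s.
theorem innerA_eq (a b limit r : Int)
    (hr1 : 1 ≤ r) (hr2 : a * a + b * b ≤ r * r) (hr3 : (r - 1) * (r - 1) < a * a + b * b) :
    ∀ (n : Nat) (lo : Int) (acc : List (List Int)), (limit - lo).toNat = n → 1 ≤ lo →
      (PySem.List.pyRange lo limit 1).foldl
        (fun acc c => if a * a + b * b = c * c then acc ++ [[a, b, c]] else acc) acc
      = if lo ≤ r ∧ r < limit ∧ r * r = a * a + b * b then acc ++ [[a, b, r]] else acc := by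
  intro n
  induction n with
  | zero =>
      intro lo acc h0 hlo
      rw [PySem.List.pyRange_one_eq_nil (by omega), List.foldl_nil, if_neg (by omega)]
  | succ n ih =>
      intro lo acc h0 hlo
      have hl : lo < limit := by omega
      rw [PySem.List.pyRange_one_cons hl, List.foldl_cons]
      by_cases heq : a * a + b * b = lo * lo
      · have hrlo : r = lo := by nlinarith [mul_self_nonneg (r - lo), mul_self_nonneg (lo - r)]
        rw [if_pos heq, ih (lo + 1) (acc ++ [[a, b, lo]]) (by omega) (by omega),
            if_neg (by omega), if_pos ⟨by omega, by omega, by rw [hrlo]; omega⟩, hrlo]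
      · rw [if_neg heq, ih (lo + 1) acc (by omega) (by omega)]
        have hiff : (lo + 1 ≤ r ∧ r < limit ∧ r * r = a * a + b * b) ↔
            (lo ≤ r ∧ r < limit ∧ r * r = a * a + b * b) := by
          constructor
          · rintro ⟨h1, h2, h3⟩; exact ⟨by omega, h2, h3⟩
          · rintro ⟨h1, h2, h3⟩
            refine ⟨?_, h2, h3⟩
            rcases eq_or_lt_of_le h1 with h | h
            · exact absurd (by rw [← h3, ← h]) heq
            · omega
        rw [if_congr hiff rfl rfl]

-- The middle b-loop: A's (b,c)-double loop equals B's two-pointer fold, given the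
-- invariant (c-1)² < a² + blo² on the incoming pointer.
theorem midEq (a limit : Int) (ha : 1 ≤ a) :
    ∀ (n : Nat) (blo c : Int) (acc : List (List Int)), (limit - blo).toNat = n →
      a ≤ blo → 1 ≤ c → (c - 1) * (c - 1) < a * a + blo * blo →
      (PySem.List.pyRange blo limit 1).foldl (fun acc b =>
          (PySem.List.pyRange b limit 1).foldl (fun acc c =>
            if a * a + b * b = c * c then acc ++ [[a, b, c]] else acc) acc) acc
      = ((PySem.List.pyRange blo limit 1).foldl (fun st b =>
            let s := a * a + b * b
            let c := pvBump s st.1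
            (c, if c * c = s ∧ c < limit then st.2 ++ [[a, b, c]] else st.2)) (c, acc)).2 := by
  intro n
  induction n with
  | zero =>
      intro blo c acc h0 hab hc hinv
      rw [PySem.List.pyRange_one_eq_nil (by omega)]
      simp
  | succ n ih =>
      intro blo c acc h0 hab hc hinv
      have hl : blo < limit := by omega
      rw [PySem.List.pyRange_one_cons hl, List.foldl_cons, List.foldl_cons]
      obtain ⟨hr0, hr2, hr3⟩ := pvBump_spec (a * a + blo * blo) c hinv
      have hr1 : 1 ≤ pvBump (a * a + blo * blo) c := by omega
      set r := pvBump (a * a + blo * blo) c with hrdef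
      rw [innerA_eq a blo limit r hr1 hr2 hr3 (limit - blo).toNat blo acc rfl (by omega)]
      have hiff : (blo ≤ r ∧ r < limit ∧ r * r = a * a + blo * blo) ↔
          (r * r = a * a + blo * blo ∧ r < limit) := by
        constructor
        · rintro ⟨h1, h2, h3⟩; exact ⟨h3, h2⟩
        · rintro ⟨h3, h2⟩
          refine ⟨?_, h2, h3⟩
          nlinarith [mul_self_nonneg (r - blo), mul_self_nonneg a]
      have hinv' : (r - 1) * (r - 1) < a * a + (blo + 1) * (blo + 1) := by nlinarith
      dsimp only
      rw [← hrdef]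
      by_cases hcond : r * r = a * a + blo * blo ∧ r < limit
      · rw [if_pos (hiff.mpr hcond), if_pos hcond,
            ih (blo + 1) r (acc ++ [[a, blo, r]]) (by omega) (by omega) hr1 hinv']
      · rw [if_neg (fun h => hcond (hiff.mp h)), if_neg hcond,
            ih (blo + 1) r acc (by omega) (by omega) hr1 hinv']

-- ===== VERDICT (by name: the statement is the Claim_ definition above) =====
theorem generate_pythagorean_triplets_spec : Claim_equal_generate_pythagorean_triplets := by
  intro limit _
  unfold Spec_generate_pythagorean_triplets generate_pythagorean_triplets
    generate_pythagorean_triplets_alt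
  refine PySem.List.foldl_congr_mem _ _ _ _ ?_
  intro acc a hmem
  have ha : 1 ≤ a := ((PySem.List.mem_pyRange_one).1 hmem).1
  exact midEq a limit ha (limit - a).toNat a a acc rfl le_rfl ha (by nlinarith)
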